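-- pv_equiv track=rewrite | github.com/ChinomnsoC/data-structure-algorithms | dynamic_programming/longest_xor_subsequence.py | longest_xor_subsequence
-- ===== SOURCE A (Python) =====
-- def longest_xor_subsequence(arr: list, k: int) -> int:
--
--     len_longest_subsequence = 0
--
--     n = len(arr)
--
--     dp= [1] * n
--
--     dp[0] = 1
--
--     for i in range(1, n):
--         for j in range(i - 1, -1, -1):
--             if (arr[i] ^ arr[j] )== k:
--                 dp[i] = max(dp[i], dp[j] + 1)
--
--
--         len_longest_subsequence = max(len_longest_subsequence, dp[i])
--
--
--     return max(dp)
-- ===== SOURCE B (Python) =====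
-- def longest_xor_subsequence(arr: list, k: int) -> int:
--     # One pass with a hash map: best[v] = length of the longest valid
--     # subsequence seen so far that ends with value v.
--     best = {}
--     ans = 0
--     for x in arr:
--         cur = best.get(x ^ k, 0) + 1
--         if cur > best.get(x, 0):
--             best[x] = cur
--         if cur > ans:
--             ans = cur
--     return ans
-- ===== Notes on version B (the rewrite author's own statement) =====
-- stated objective: faster
-- what changed: Replaced the quadratic nested-loop DP (for each i, scan all j<i testing arr[i]^arr[j]==k) by a single pass that keeps a hash map value->best chain length and looks up arr[i]^k directly.
import Mathlib
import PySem

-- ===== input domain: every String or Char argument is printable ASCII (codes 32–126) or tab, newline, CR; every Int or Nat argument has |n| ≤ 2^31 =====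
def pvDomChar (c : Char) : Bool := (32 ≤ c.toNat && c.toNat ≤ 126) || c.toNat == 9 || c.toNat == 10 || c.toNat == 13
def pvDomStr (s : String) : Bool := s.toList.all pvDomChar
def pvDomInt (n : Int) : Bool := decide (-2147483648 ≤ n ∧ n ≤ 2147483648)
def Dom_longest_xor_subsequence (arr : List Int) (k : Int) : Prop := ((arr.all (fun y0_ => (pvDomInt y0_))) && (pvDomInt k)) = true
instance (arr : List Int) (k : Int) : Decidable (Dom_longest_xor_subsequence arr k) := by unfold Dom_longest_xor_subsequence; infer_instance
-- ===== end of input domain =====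

-- B replaces A's O(n^2) nested-loop DP by a one-pass hash-map DP (lookup of arr[i]^k); faster (asymptotic).

-- ===== PORT A =====
def longest_xor_subsequence (arr : List Int) (k : Int) : Int :=
  let n : Int := arr.length
  let dp0 : List Int := List.replicate n.toNat 1          -- dp = [1] * n
  let dp1 := PySem.List.pySetD dp0 0 1                    -- dp[0] = 1  (IndexError on empty arr: excluded by Pre_)
  let st := (PySem.List.pyRange 1 n 1).foldl (fun (st : List Int × Int) i =>
      let dpi := (PySem.List.pyRange (i - 1) (-1) (-1)).foldl (fun dp j =>
          if PySem.Int.bxor (PySem.List.pyGetD arr i 0) (PySem.List.pyGetD arr j 0) = k then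
            PySem.List.pySetD dp i (max (PySem.List.pyGetD dp i 0) (PySem.List.pyGetD dp j 0 + 1))
          else dp) st.1
      (dpi, max st.2 (PySem.List.pyGetD dpi i 0))) (dp1, 0)
  (PySem.List.max? st.1 id).getD 0                        -- max(dp)  (ValueError on empty: excluded by Pre_)

-- ===== PORT B =====
def longest_xor_subsequence_alt (arr : List Int) (k : Int) : Int :=
  let st := arr.foldl (fun (st : PySem.Dict Int Int × Int) x =>
      let cur := st.1.getD (PySem.Int.bxor x k) 0 + 1
      let best := if cur > st.1.getD x 0 then st.1.insert x cur else st.1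
      let ans := if cur > st.2 then cur else st.2
      (best, ans)) (PySem.Dict.empty, 0)
  st.2

-- ===== PRECONDITION & SPEC =====
-- A raises IndexError on the empty list (dp[0] = 1); Pre_ excludes exactly that input.
def Pre_longest_xor_subsequence (arr : List Int) (k : Int) : Prop := arr ≠ []
instance (arr : List Int) (k : Int) : Decidable (Pre_longest_xor_subsequence arr k) := by unfold Pre_longest_xor_subsequence; infer_instance
def pvWitness_longest_xor_subsequence : List Int × Int := ([1, 2, 3], 3)

def Spec_longest_xor_subsequence (arr : List Int) (k : Int) (out : Int) : Prop := out = longest_xor_subsequence_alt arr k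
instance (arr : List Int) (k : Int) (out : Int) : Decidable (Spec_longest_xor_subsequence arr k out) := by unfold Spec_longest_xor_subsequence; infer_instance

-- ===== CLAIM (what is proved, stated in full; the proofs are below) =====
def Claim_equal_longest_xor_subsequence : Prop := ∀ (arr : List Int) (k : Int), Dom_longest_xor_subsequence arr k → Pre_longest_xor_subsequence arr k → Spec_longest_xor_subsequence arr k (longest_xor_subsequence arr k)
-- ===== LEMMAS AND PROOFS =====

-- XOR cancellation: a ^ (a ^ b) = b for Python's infinite-two's-complement xor
theorem pv_nat_xor_cancel (a b : Nat) : a ^^^ (a ^^^ b) = b := by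
  rw [← Nat.xor_assoc, Nat.xor_self, Nat.zero_xor]

theorem pv_bxor_cancel (a b : Int) : PySem.Int.bxor a (PySem.Int.bxor a b) = b := by
  unfold PySem.Int.bxor
  split_ifs with h1 h2 h3 h4 h5 h6 h7 h8 <;>
    simp_all [pv_nat_xor_cancel] <;> omega

theorem pv_bxor_eq_iff (a b k : Int) : PySem.Int.bxor a b = k ↔ b = PySem.Int.bxor a k := by
  constructor
  · rintro rfl; exact (pv_bxor_cancel a b).symm
  · rintro rfl; exact pv_bxor_cancel a k

-- ghost DP: list of (value, best chain length ending at that occurrence)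
def pvBestOf (ps : List (Int × Int)) (t : Int) : Int :=
  ps.foldl (fun m p => if p.1 = t then max m p.2 else m) 0

def pvMaxSnd (ps : List (Int × Int)) : Int :=
  ps.foldl (fun m p => max m p.2) 0

def pvPairs (k : Int) : List (Int × Int) → List Int → List (Int × Int)
  | ps, [] => ps
  | ps, x :: r => pvPairs k (ps ++ [(x, pvBestOf ps (PySem.Int.bxor x k) + 1)]) r

theorem pvBestOf_append (ps : List (Int × Int)) (p : Int × Int) (t : Int) :
    pvBestOf (ps ++ [p]) t = if p.1 = t then max (pvBestOf ps t) p.2 else pvBestOf ps t := by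
  simp [pvBestOf, List.foldl_append]

theorem pvMaxSnd_append (ps : List (Int × Int)) (p : Int × Int) :
    pvMaxSnd (ps ++ [p]) = max (pvMaxSnd ps) p.2 := by
  simp [pvMaxSnd, List.foldl_append]

theorem pvBestOf_nonneg_aux (t : Int) (ps : List (Int × Int)) : ∀ a : Int, a ≤
    ps.foldl (fun m p => if p.1 = t then max m p.2 else m) a := by
  induction ps with
  | nil => intro a; simp
  | cons p r ih =>
    intro a
    refine le_trans ?_ (ih (if p.1 = t then max a p.2 else a))
    split_ifs <;> omega

theorem pvBestOf_nonneg (ps : List (Int × Int)) (t : Int) : 0 ≤ pvBestOf ps t :=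
  pvBestOf_nonneg_aux t ps 0

theorem pvPairs_map_fst (k : Int) (l : List Int) : ∀ ps : List (Int × Int),
    (pvPairs k ps l).map (·.1) = ps.map (·.1) ++ l := by
  induction l with
  | nil => intro ps; simp [pvPairs]
  | cons x r ih => intro ps; simp [pvPairs, ih]

theorem pvPairs_prefix (k : Int) (l : List Int) : ∀ ps : List (Int × Int), ps <+: pvPairs k ps l := by
  induction l with
  | nil => intro ps; simp [pvPairs]
  | cons x r ih =>
    intro ps
    exact List.IsPrefix.trans (List.prefix_append ps _) (ih _)

theorem pvPairs_snd_pos (k : Int) (l : List Int) : ∀ ps : List (Int × Int),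
    (∀ p ∈ ps, 1 ≤ p.2) → ∀ p ∈ pvPairs k ps l, 1 ≤ p.2 := by
  induction l with
  | nil => intro ps h; exact h
  | cons x r ih =>
    intro ps h
    refine ih _ ?_
    intro p hp
    rcases List.mem_append.1 hp with hp | hp
    · exact h p hp
    · have hb := pvBestOf_nonneg ps (PySem.Int.bxor x k)
      have hpe : p = (x, pvBestOf ps (PySem.Int.bxor x k) + 1) := by simpa using hp
      rw [hpe]
      dsimp
      omega

-- the defining recurrence, read off at any index past the seed
theorem pvPairs_char (k : Int) (l : List Int) : ∀ (ps : List (Int × Int)) (m : Nat)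
    (hm : ps.length ≤ m) (h : m < (pvPairs k ps l).length),
    (pvPairs k ps l)[m].2
      = pvBestOf ((pvPairs k ps l).take m) (PySem.Int.bxor ((pvPairs k ps l)[m].1) k) + 1 := by
  induction l with
  | nil => intro ps m hm h; simp [pvPairs] at hm h; omega
  | cons x r ih =>
    intro ps m hm h
    simp only [pvPairs] at h ⊢
    set nv := (x, pvBestOf ps (PySem.Int.bxor x k) + 1) with hnv
    rcases Nat.lt_or_ge m (ps.length + 1) with hlt | hge
    · -- m = ps.length: the element is nv and the prefix is ps
      have hm' : m = ps.length := by omega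
      subst hm'
      have hpre : (ps ++ [nv]) <+: pvPairs k (ps ++ [nv]) r := pvPairs_prefix k r _
      have hget : (pvPairs k (ps ++ [nv]) r)[ps.length] = nv := by
        have h1 := hpre.getElem (i := ps.length) (by simp)
        simpa using h1.symm
      have hpre2 : ps <+: pvPairs k (ps ++ [nv]) r :=
        (List.prefix_append ps [nv]).trans hpre
      have htk : (pvPairs k (ps ++ [nv]) r).take ps.length = ps :=
        (List.prefix_iff_eq_take.1 hpre2).symm
      rw [hget, htk]
    · -- recurse with the longer seed
      exact ih (ps ++ [nv]) m (by simpa using hge) h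

-- ===== B side =====

theorem pvB_invariant (k : Int) (l : List Int) : ∀ (best : PySem.Dict Int Int) (ans : Int)
    (ps : List (Int × Int)),
    (∀ v, best.getD v 0 = pvBestOf ps v) → ans = pvMaxSnd ps →
    (l.foldl (fun (st : PySem.Dict Int Int × Int) x =>
      let cur := st.1.getD (PySem.Int.bxor x k) 0 + 1
      let best := if cur > st.1.getD x 0 then st.1.insert x cur else st.1
      let ans := if cur > st.2 then cur else st.2
      (best, ans)) (best, ans)).2 = pvMaxSnd (pvPairs k ps l) := by
  induction l with
  | nil => intro best ans ps _ hans; simpa [pvPairs] using hans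
  | cons x r ih =>
    intro best ans ps hbest hans
    simp only [List.foldl_cons]
    show (r.foldl _ (_, _)).2 = _
    have hcur : best.getD (PySem.Int.bxor x k) 0 + 1 = pvBestOf ps (PySem.Int.bxor x k) + 1 := by
      rw [hbest]
    simp only [pvPairs]
    set c := pvBestOf ps (PySem.Int.bxor x k) + 1 with hc
    rw [hcur]
    refine ih _ _ (ps ++ [(x, c)]) ?_ ?_
    · intro v
      rw [pvBestOf_append]
      dsimp only
      by_cases hgt : c > best.getD x 0
      · rw [if_pos hgt, PySem.Dict.getD_insert]
        have hx := hbest x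
        by_cases hvx : x = v
        · subst hvx; rw [if_pos rfl, if_pos rfl]; omega
        · rw [if_neg (fun hh => hvx hh.symm), if_neg hvx, hbest]
      · rw [if_neg hgt]
        have hx := hbest x
        by_cases hvx : x = v
        · subst hvx; rw [if_pos rfl, hbest]; omega
        · rw [if_neg hvx, hbest]
    · rw [pvMaxSnd_append]
      dsimp only
      split_ifs <;> omega

theorem pvB_eq (arr : List Int) (k : Int) :
    longest_xor_subsequence_alt arr k = pvMaxSnd (pvPairs k [] arr) := by
  unfold longest_xor_subsequence_alt
  refine pvB_invariant k arr PySem.Dict.empty 0 [] ?_ rfl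
  intro v
  simp [PySem.Dict.getD, PySem.Dict.get?, PySem.Dict.empty, pvBestOf]

-- ===== A side =====

-- the inner loop only writes position i; reads are below i, so it is one write of a scalar fold
theorem pv_setfold (i : Nat) (P : Int → Prop) [DecidablePred P] :
    ∀ (js : List Int) (dp : List Int), i < dp.length → (∀ j ∈ js, 0 ≤ j ∧ j < (i : Int)) →
    js.foldl (fun dp j =>
        if P j then
          PySem.List.pySetD dp (i : Int) (max (PySem.List.pyGetD dp (i : Int) 0) (PySem.List.pyGetD dp j 0 + 1))
        else dp) dp
      = PySem.List.pySetD dp (i : Int)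
          (js.foldl (fun v j => if P j then max v (PySem.List.pyGetD dp j 0 + 1) else v)
            (PySem.List.pyGetD dp (i : Int) 0)) := by
  intro js
  induction js with
  | nil =>
    intro dp hi _
    simp only [List.foldl_nil]
    rw [PySem.List.pySetD_natCast, PySem.List.pyGetD_natCast]
    rw [List.getD_eq_getElem dp 0 hi, List.set_getElem_self]
  | cons j js ih =>
    intro dp hi hj
    obtain ⟨hj0, hjlt⟩ := hj j (by simp)
    have hjc : (j : Int) = ((j.toNat : Nat) : Int) := (Int.toNat_of_nonneg hj0).symm
    simp only [List.foldl_cons]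
    by_cases hP : P j
    · simp only [if_pos hP]
      set w0 := max (PySem.List.pyGetD dp (i : Int) 0) (PySem.List.pyGetD dp (j : Int) 0 + 1) with hw0
      set dp' := PySem.List.pySetD dp (i : Int) w0 with hdp'
      have hlen' : i < dp'.length := by
        rw [hdp', PySem.List.pySetD_natCast, List.length_set]; exact hi
      rw [ih dp' hlen' (fun j' hj' => hj j' (by simp [hj']))]
      have hgi : PySem.List.pyGetD dp' (i : Int) 0 = w0 := by
        rw [hdp']
        have := PySem.List.pyGetD_pySetD_natCast dp i i w0 0 hi
        simpa using this
      have hbody : ∀ (v : Int), ∀ j' ∈ js,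
          (if P j' then max v (PySem.List.pyGetD dp' j' 0 + 1) else v)
            = (if P j' then max v (PySem.List.pyGetD dp j' 0 + 1) else v) := by
        intro v j' hj'
        obtain ⟨h0', hlt'⟩ := hj j' (by simp [hj'])
        have hj'c : j' = ((j'.toNat : Nat) : Int) := (Int.toNat_of_nonneg h0').symm
        have hne : ¬ (j'.toNat = i) := by omega
        rw [hj'c, hdp', PySem.List.pyGetD_pySetD_natCast dp i j'.toNat w0 0 hi, if_neg hne]
      rw [PySem.List.foldl_congr_mem js _ _ _ hbody, hgi]
      rw [hdp', PySem.List.pySetD_natCast, PySem.List.pySetD_natCast, List.set_set,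
        PySem.List.pySetD_natCast]
    · simp only [if_neg hP]
      exact ih dp hi (fun j' hj' => hj j' (by simp [hj']))

-- pull the +1 out of a max-accumulating fold
theorem pv_foldl_max_succ (t : Int) (q : List (Int × Int)) : ∀ a : Int,
    q.foldl (fun v p => if p.1 = t then max v (p.2 + 1) else v) (a + 1)
      = q.foldl (fun v p => if p.1 = t then max v p.2 else v) a + 1 := by
  induction q with
  | nil => intro a; rfl
  | cons p r ih =>
    intro a
    simp only [List.foldl_cons]
    split_ifs
    · rw [show max (a + 1) (p.2 + 1) = max a p.2 + 1 by omega]; exact ih _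
    · exact ih a

-- the outer fold's first component ignores the second
theorem pv_foldl_fst {α β γ : Type} (F : α × β → γ → α × β) (G : α → γ → α)
    (hF : ∀ s x, (F s x).1 = G s.1 x) : ∀ (l : List γ) (s : α × β),
    (l.foldl F s).1 = l.foldl G s.1 := by
  intro l
  induction l with
  | nil => intro s; rfl
  | cons x r ih => intro s; simp [List.foldl_cons, ih, hF]

-- ascending index fold over a pair list is the ghost bestOf, shifted by one
theorem pv_scalfold (t : Int) (q : List (Int × Int)) :
    (PySem.List.pyRange 0 (q.length : Int) 1).foldl
      (fun v j => if (PySem.List.pyGetD q j ((0 : Int), (0 : Int))).1 = t then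
          max v ((PySem.List.pyGetD q j ((0 : Int), (0 : Int))).2 + 1) else v) 1
      = pvBestOf q t + 1 := by
  have h1 := PySem.List.foldl_pyRange_zero_pyGetD q ((0 : Int), (0 : Int))
    (fun v pr => if pr.1 = t then max v (pr.2 + 1) else v) 1
  rw [PySem.List.len_eq] at h1
  rw [h1]
  have h2 := pv_foldl_max_succ t q 0
  simpa [pvBestOf] using h2

-- A's dp after the outer loop is exactly the ghost DP values
theorem pvA_dp (arr : List Int) (k : Int) (h : arr ≠ []) :
    (PySem.List.pyRange 1 (arr.length : Int) 1).foldl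
      (fun dp i => (PySem.List.pyRange (i - 1) (-1) (-1)).foldl (fun dp j =>
          if PySem.Int.bxor (PySem.List.pyGetD arr i 0) (PySem.List.pyGetD arr j 0) = k then
            PySem.List.pySetD dp i (max (PySem.List.pyGetD dp i 0) (PySem.List.pyGetD dp j 0 + 1))
          else dp) dp)
      (PySem.List.pySetD (List.replicate (arr.length : Int).toNat 1) 0 1)
      = (pvPairs k [] arr).map (·.2) := by
  have hfst : (pvPairs k [] arr).map (·.1) = arr := by simpa using pvPairs_map_fst k arr []
  have hplen : (pvPairs k [] arr).length = arr.length := by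
    have := congrArg List.length hfst; simpa using this
  have hDlen : ((pvPairs k [] arr).map (·.2)).length = arr.length := by simpa using hplen
  have hnpos : 0 < arr.length := by
    cases arr with
    | nil => exact absurd rfl h
    | cons a r => simp
  have hchar : ∀ (m : Nat) (hm : m < (pvPairs k [] arr).length),
      ((pvPairs k [] arr)[m]'hm).2
        = pvBestOf ((pvPairs k [] arr).take m)
            (PySem.Int.bxor (((pvPairs k [] arr)[m]'hm).1) k) + 1 :=
    fun m hm => pvPairs_char k arr [] m (Nat.zero_le m) hm
  have harr : ∀ (m : Nat) (hm : m < (pvPairs k [] arr).length),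
      ((pvPairs k [] arr)[m]'hm).1 = arr[m]'(by omega) := by
    intro m hm
    have h1 : ((pvPairs k [] arr).map (·.1))[m]'(by simpa using hm) = arr[m]'(by omega) :=
      List.getElem_of_eq hfst (by simpa using hm)
    simpa using h1
  -- dp[0] = 1 leaves [1]*n unchanged
  have hdp1 : PySem.List.pySetD (List.replicate ((arr.length : Int)).toNat 1) 0 1
      = List.replicate arr.length (1 : Int) := by
    rw [PySem.List.pySetD_of_nonneg _ _ (by norm_num)]
    rw [show ((arr.length : Int)).toNat = arr.length by omega]
    cases hh : arr.length with
    | zero => omega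
    | succ nn => simp [List.replicate_succ]
  rw [hdp1]
  -- the loop invariant, by induction on the number of processed indices
  have hinv : ∀ (m : Nat), 1 ≤ m → m ≤ arr.length →
      (PySem.List.pyRange 1 (m : Int) 1).foldl
        (fun dp i => (PySem.List.pyRange (i - 1) (-1) (-1)).foldl (fun dp j =>
            if PySem.Int.bxor (PySem.List.pyGetD arr i 0) (PySem.List.pyGetD arr j 0) = k then
              PySem.List.pySetD dp i (max (PySem.List.pyGetD dp i 0) (PySem.List.pyGetD dp j 0 + 1))
            else dp) dp)
        (List.replicate arr.length (1 : Int))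
        = ((pvPairs k [] arr).map (·.2)).take m
            ++ List.replicate (arr.length - m) 1 := by
    intro m
    induction m with
    | zero => omega
    | succ m ihm =>
      intro _ hmn
      by_cases h1 : m = 0
      · -- first iteration is vacuous: range(1, 1) is empty
        subst h1
        rw [show ((1 : Nat) : Int) = 1 by norm_num, PySem.List.pyRange_one_eq_nil (by omega),
          List.foldl_nil]
        have h0 : (((pvPairs k [] arr).map (·.2))[0]'(by omega)) = 1 := by
          have hc := hchar 0 (by omega)
          simp [pvBestOf] at hc
          simpa using hc
        have htake1 : ∀ (l : List Int) (hl : 0 < l.length), l.take 1 = [l[0]'hl] := by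
          intro l hl
          cases l with
          | nil => simp at hl
          | cons a r => simp
        have ht1 : (((pvPairs k [] arr).map (·.2))).take 1
            = [(((pvPairs k [] arr).map (·.2))[0]'(by omega))] := htake1 _ (by omega)
        rw [ht1, h0]
        cases hh : arr.length with
        | zero => omega
        | succ nn => simp [List.replicate_succ]
      · -- step m → m + 1
        have hm1 : 1 ≤ m := by omega
        have hmlt : m < arr.length := by omega
        have hmp : m < (pvPairs k [] arr).length := by omega
        rw [show ((m + 1 : Nat) : Int) = (m : Int) + 1 by push_cast; ring,
          PySem.List.pyRange_one_succ_right (by exact_mod_cast hm1),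
          List.foldl_append, ihm hm1 (by omega), List.foldl_cons, List.foldl_nil]
        have hdpmlen : (((pvPairs k [] arr).map (·.2)).take m
            ++ List.replicate (arr.length - m) (1 : Int)).length = arr.length := by
          simp [hDlen]; omega
        have hjs : ∀ j ∈ PySem.List.pyRange ((m : Int) - 1) (-1) (-1), 0 ≤ j ∧ j < (m : Int) := by
          intro j hj
          rw [PySem.List.mem_pyRange_neg_one] at hj
          omega
        rw [pv_setfold m (fun j => PySem.Int.bxor (PySem.List.pyGetD arr (m : Int) 0)
              (PySem.List.pyGetD arr j 0) = k) _ _ (by omega) hjs]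
        -- the seed dp[m] is 1 (still in the replicate part)
        have hv0 : PySem.List.pyGetD (((pvPairs k [] arr).map (·.2)).take m
            ++ List.replicate (arr.length - m) (1 : Int)) (m : Int) 0 = 1 := by
          rw [PySem.List.pyGetD_eq_getElem _ 0 (by omega) (by rw [hdpmlen]; exact_mod_cast hmlt)]
          rw [List.getElem_append_right (by rw [List.length_take]; omega)]
          simp [hDlen]
        rw [hv0]
        -- the scalar fold computes bestOf of the ghost prefix, plus one
        have hqlen : ((pvPairs k [] arr).take m).length = m := by simp [hplen]; omega
        have hrev : PySem.List.pyRange ((m : Int) - 1) (-1) (-1)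
            = (PySem.List.pyRange 0 (m : Int) 1).reverse := by
          rw [PySem.List.pyRange_neg_one_eq_reverse]
          norm_num
        have hscal : (PySem.List.pyRange ((m : Int) - 1) (-1) (-1)).foldl
            (fun v j => if PySem.Int.bxor (PySem.List.pyGetD arr (m : Int) 0)
                (PySem.List.pyGetD arr j 0) = k then
                max v (PySem.List.pyGetD (((pvPairs k [] arr).map (·.2)).take m
                  ++ List.replicate (arr.length - m) (1 : Int)) j 0 + 1) else v) 1
            = pvBestOf ((pvPairs k [] arr).take m)
                (PySem.Int.bxor (PySem.List.pyGetD arr (m : Int) 0) k) + 1 := by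
          rw [hrev]
          haveI : RightCommutative (fun (v : Int) (j : Int) =>
              if PySem.Int.bxor (PySem.List.pyGetD arr (m : Int) 0)
                  (PySem.List.pyGetD arr j 0) = k then
                max v (PySem.List.pyGetD (((pvPairs k [] arr).map (·.2)).take m
                  ++ List.replicate (arr.length - m) (1 : Int)) j 0 + 1) else v) :=
            ⟨by intro b a1 a2; split_ifs <;> omega⟩
          rw [(List.reverse_perm (PySem.List.pyRange 0 (m : Int) 1)).foldl_eq]
          have hbody : ∀ (v : Int), ∀ j ∈ PySem.List.pyRange 0 (m : Int) 1,
              (if PySem.Int.bxor (PySem.List.pyGetD arr (m : Int) 0)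
                  (PySem.List.pyGetD arr j 0) = k then
                max v (PySem.List.pyGetD (((pvPairs k [] arr).map (·.2)).take m
                  ++ List.replicate (arr.length - m) (1 : Int)) j 0 + 1) else v)
                = (if (PySem.List.pyGetD ((pvPairs k [] arr).take m)
                      j ((0 : Int), (0 : Int))).1
                      = PySem.Int.bxor (PySem.List.pyGetD arr (m : Int) 0) k then
                    max v ((PySem.List.pyGetD ((pvPairs k [] arr).take m)
                      j ((0 : Int), (0 : Int))).2 + 1) else v) := by
            intro v j hj
            rw [PySem.List.mem_pyRange_one] at hj
            have hjn : j.toNat < m := by omega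
            have hjq : PySem.List.pyGetD ((pvPairs k [] arr).take m) j ((0 : Int), (0 : Int))
                = ((pvPairs k [] arr).take m)[j.toNat]'(by omega) :=
              PySem.List.pyGetD_eq_getElem _ _ (by omega) (by rw [hqlen]; exact_mod_cast hj.2)
            have hjarr : PySem.List.pyGetD arr j 0 = arr[j.toNat]'(by omega) :=
              PySem.List.pyGetD_eq_getElem _ _ (by omega) (by exact_mod_cast (by omega : j < (arr.length : Int)))
            have hjdp : PySem.List.pyGetD (((pvPairs k [] arr).map (·.2)).take m
                ++ List.replicate (arr.length - m) (1 : Int)) j 0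
                = ((pvPairs k [] arr)[j.toNat]'(by omega)).2 := by
              rw [PySem.List.pyGetD_eq_getElem _ 0 (by omega)
                (by rw [hdpmlen]; exact_mod_cast (by omega : j < (arr.length : Int)))]
              rw [List.getElem_append_left (by simp [hDlen]; omega)]
              rw [List.getElem_take, List.getElem_map]
            have hcond : (PySem.Int.bxor (PySem.List.pyGetD arr (m : Int) 0)
                  (PySem.List.pyGetD arr j 0) = k)
                ↔ ((PySem.List.pyGetD ((pvPairs k [] arr).take m) j ((0 : Int), (0 : Int))).1
                    = PySem.Int.bxor (PySem.List.pyGetD arr (m : Int) 0) k) := by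
              rw [pv_bxor_eq_iff, hjq, hjarr, List.getElem_take, harr j.toNat (by omega)]
            by_cases hc : PySem.Int.bxor (PySem.List.pyGetD arr (m : Int) 0)
                (PySem.List.pyGetD arr j 0) = k
            · rw [if_pos hc, if_pos (hcond.1 hc), hjdp, hjq, List.getElem_take]
            · rw [if_neg hc, if_neg (fun hcc => hc (hcond.2 hcc))]
          rw [PySem.List.foldl_congr_mem _ _ _ _ hbody]
          have := pv_scalfold (PySem.Int.bxor (PySem.List.pyGetD arr (m : Int) 0) k)
            ((pvPairs k [] arr).take m)
          rw [hqlen] at this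
          exact this
        rw [hscal]
        -- writing dp[m] extends the finished prefix by one
        have hgetm : PySem.List.pyGetD arr (m : Int) 0 = arr[m]'hmlt :=
          PySem.List.pyGetD_eq_getElem _ _ (by omega) (by exact_mod_cast hmlt)
        have hval : pvBestOf ((pvPairs k [] arr).take m)
            (PySem.Int.bxor (PySem.List.pyGetD arr (m : Int) 0) k) + 1
            = ((pvPairs k [] arr)[m]'hmp).2 := by
          rw [hgetm, ← harr m hmp, ← hchar m hmp]
        rw [hval]
        rw [PySem.List.pySetD_of_nonneg _ _ (by omega)]
        rw [show ((m : Int)).toNat = m by omega]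
        rw [List.set_append_right m _ (by rw [List.length_take]; omega)]
        rw [show m - (((pvPairs k [] arr).map (·.2)).take m).length = 0 by simp [hDlen]; omega]
        have hrepl : (List.replicate (arr.length - m) (1 : Int)).set 0
            (((pvPairs k [] arr)[m]'hmp).2)
            = ((pvPairs k [] arr)[m]'hmp).2 :: List.replicate (arr.length - (m + 1)) 1 := by
          cases hh : arr.length - m with
          | zero => omega
          | succ nn =>
            rw [List.replicate_succ]
            simp [show arr.length - (m + 1) = nn by omega]
        rw [hrepl]
        have htake : (((pvPairs k [] arr).map (·.2))).take (m + 1)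
            = (((pvPairs k [] arr).map (·.2))).take m ++ [((pvPairs k [] arr)[m]'hmp).2] := by
          rw [List.take_succ]
          congr 1
          rw [List.getElem?_eq_getElem (by simpa using hmp)]
          simp
        rw [htake, List.append_assoc, List.singleton_append]
  have hfin := hinv arr.length hnpos (le_refl _)
  rw [hfin]
  simp [hDlen]

-- Python max of a list of values ≥ 1 is the 0-seeded max fold
theorem pv_max?_step (m x : Int) (xs : List Int) :
    PySem.List.max? (m :: x :: xs) id = PySem.List.max? (max m x :: xs) id := by
  simp only [PySem.List.max?, List.foldl_cons, id_eq]
  rcases lt_or_ge m x with hxm | hxm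
  · rw [if_pos hxm, show max m x = x by omega]
  · rw [if_neg (by omega), show max m x = m by omega]

theorem pv_max?_cons (xs : List Int) : ∀ m : Int,
    PySem.List.max? (m :: xs) id = some (xs.foldl max m) := by
  induction xs with
  | nil => intro m; rfl
  | cons x r ih =>
    intro m
    rw [pv_max?_step, ih (max m x), List.foldl_cons]

theorem pv_max?_getD (xs : List Int) (h : xs ≠ []) (hpos : ∀ x ∈ xs, 1 ≤ x) :
    (PySem.List.max? xs id).getD 0 = xs.foldl max 0 := by
  rcases xs with _ | ⟨x, r⟩
  · exact absurd rfl h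
  · have hx : 1 ≤ x := hpos x (by simp)
    rw [pv_max?_cons, Option.getD_some, List.foldl_cons, show max 0 x = x by omega]

-- ===== VERDICT (by name: the statement is the Claim_ definition above) =====
-- A's return value, via the ghost DP
theorem pvA_eq (arr : List Int) (k : Int) (h : arr ≠ []) :
    longest_xor_subsequence arr k
      = (PySem.List.max? ((pvPairs k [] arr).map (·.2)) id).getD 0 := by
  unfold longest_xor_subsequence
  show (PySem.List.max?
      ((PySem.List.pyRange 1 (arr.length : Int) 1).foldl
        (fun (st : List Int × Int) i =>
          ((PySem.List.pyRange (i - 1) (-1) (-1)).foldl (fun dp j =>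
            if PySem.Int.bxor (PySem.List.pyGetD arr i 0) (PySem.List.pyGetD arr j 0) = k then
              PySem.List.pySetD dp i (max (PySem.List.pyGetD dp i 0) (PySem.List.pyGetD dp j 0 + 1))
            else dp) st.1,
           max st.2 (PySem.List.pyGetD ((PySem.List.pyRange (i - 1) (-1) (-1)).foldl (fun dp j =>
            if PySem.Int.bxor (PySem.List.pyGetD arr i 0) (PySem.List.pyGetD arr j 0) = k then
              PySem.List.pySetD dp i (max (PySem.List.pyGetD dp i 0) (PySem.List.pyGetD dp j 0 + 1))
            else dp) st.1) i 0)))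
        (PySem.List.pySetD (List.replicate (arr.length : Int).toNat 1) 0 1, 0)).1 id).getD 0
    = (PySem.List.max? ((pvPairs k [] arr).map (·.2)) id).getD 0
  rw [pv_foldl_fst _
    (fun dp i => (PySem.List.pyRange (i - 1) (-1) (-1)).foldl (fun dp j =>
      if PySem.Int.bxor (PySem.List.pyGetD arr i 0) (PySem.List.pyGetD arr j 0) = k then
        PySem.List.pySetD dp i (max (PySem.List.pyGetD dp i 0) (PySem.List.pyGetD dp j 0 + 1))
      else dp) dp)
    (fun s x => rfl)]
  rw [pvA_dp arr k h]

theorem longest_xor_subsequence_spec : Claim_equal_longest_xor_subsequence := by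
  unfold Claim_equal_longest_xor_subsequence Spec_longest_xor_subsequence
    Pre_longest_xor_subsequence
  intro arr k _ hpre
  rw [pvA_eq arr k hpre, pvB_eq]
  have hfst : (pvPairs k [] arr).map (·.1) = arr := by simpa using pvPairs_map_fst k arr []
  have hplen : (pvPairs k [] arr).length = arr.length := by
    have := congrArg List.length hfst; simpa using this
  have hne : (pvPairs k [] arr).map (·.2) ≠ [] := by
    intro hcon
    have := congrArg List.length hcon
    simp [hplen] at this
    exact hpre this
  have hpos : ∀ x ∈ (pvPairs k [] arr).map (·.2), 1 ≤ x := by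
    intro x hx
    rcases List.mem_map.1 hx with ⟨pr, hpr, rfl⟩
    exact pvPairs_snd_pos k arr [] (by simp) pr hpr
  rw [pv_max?_getD _ hne hpos, List.foldl_map]
  rfl
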